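-- pv_equiv track=rewrite | github.com/altoid/leetcode | py/rain_water_42.py | next_hole_at_level
-- ===== SOURCE A (Python) =====
-- def next_hole_at_level(arr, level):
--     """
--     give me the array slice of the next slot we can fill at this level.  return None if no candidates.
--     """
--     i = 0
--     while i < len(arr) and arr[i] <= level:
--         i += 1
--
--     if i == len(arr):
--         return None
--
--     # arr[i] > level
--     while i < len(arr) and arr[i] > level:
--         i += 1
--
--     if i == len(arr):
--         return None
--
--     # arr[i] == level and is to the right of something taller.
--
--     j = i
--     while j < len(arr) and arr[j] <= level:
--         j += 1
--
--     if j == len(arr):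
--         return None
--
--     # are we here?  then there is some element to the left of [i] that is bigger than level, so we have a cistern.
--     return i, j
-- ===== SOURCE B (Python) =====
-- def next_hole_at_level(arr, level):
--     """
--     give me the array slice of the next slot we can fill at this level.  return None if no candidates.
--     """
--     # compress arr into maximal runs of (is_wall, start_index), walls being values > level
--     runs = []
--     for idx, x in enumerate(arr):
--         wall = x > level
--         if not runs or runs[-1][0] != wall:
--             runs.append((wall, idx))
--     # the valley starts at the run right after the first wall run; it is closed by the run after that
--     for t, (wall, _) in enumerate(runs):
--         if wall:
--             if t + 2 < len(runs):
--                 return runs[t + 1][1], runs[t + 2][1]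
--             return None
--     return None
-- ===== Notes on version B (the rewrite author's own statement) =====
-- stated objective: alternative
-- what changed: Replaces A's three sequential index-advancing while loops over the array by a single pass that compresses the array into maximal (is_wall, start) runs, then reads the answer off the run list: the two run starts following the first wall run.
import Mathlib
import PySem

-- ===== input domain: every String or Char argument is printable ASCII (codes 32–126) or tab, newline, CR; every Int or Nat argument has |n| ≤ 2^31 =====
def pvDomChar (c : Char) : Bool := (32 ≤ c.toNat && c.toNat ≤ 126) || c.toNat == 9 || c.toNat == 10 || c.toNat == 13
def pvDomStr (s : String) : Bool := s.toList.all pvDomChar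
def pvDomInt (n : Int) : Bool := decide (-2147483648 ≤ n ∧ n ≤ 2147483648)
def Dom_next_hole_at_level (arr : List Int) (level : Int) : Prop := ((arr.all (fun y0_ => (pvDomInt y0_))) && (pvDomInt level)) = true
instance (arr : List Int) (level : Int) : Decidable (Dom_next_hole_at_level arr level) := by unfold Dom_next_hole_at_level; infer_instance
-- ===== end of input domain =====

-- B compresses the array into maximal (is_wall, start) runs in one pass and reads the
-- answer off the run list, instead of A's three sequential index-advancing while loops.

-- ===== PORT A =====
-- `while i < len(arr) and arr[i] <= level: i += 1`
def pvScanLe (arr : List Int) (level : Int) (i : Nat) : Nat :=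
  if h : i < arr.length then
    if arr[i] ≤ level then pvScanLe arr level (i + 1) else i
  else i
termination_by arr.length - i

-- `while i < len(arr) and arr[i] > level: i += 1`
def pvScanGt (arr : List Int) (level : Int) (i : Nat) : Nat :=
  if h : i < arr.length then
    if level < arr[i] then pvScanGt arr level (i + 1) else i
  else i
termination_by arr.length - i

def next_hole_at_level (arr : List Int) (level : Int) : Option (Int × Int) :=
  let i1 := pvScanLe arr level 0
  if i1 = arr.length then none
  else
    let i2 := pvScanGt arr level i1
    if i2 = arr.length then none
    else
      let j := pvScanLe arr level i2
      if j = arr.length then none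
      else some ((i2 : Int), (j : Int))

-- ===== PORT B =====
-- first loop of B: compress into runs of (is_wall, start); `prev` is the flag of the
-- last appended run (none while `runs` is still empty)
def pvRuns (level : Int) : List Int → Nat → Option Bool → List (Bool × Nat)
  | [], _, _ => []
  | x :: xs, idx, prev =>
    let w := decide (level < x)
    if prev = some w then pvRuns level xs (idx + 1) prev
    else (w, idx) :: pvRuns level xs (idx + 1) (some w)

-- second loop of B: find the first wall run, answer from the two runs after it
def pvFindWall : List (Bool × Nat) → Option (Int × Int)
  | [] => none
  | (true, _) :: rest =>
    match rest with
    | (_, i) :: (_, j) :: _ => some ((i : Int), (j : Int))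
    | _ => none
  | (false, _) :: rest => pvFindWall rest

def next_hole_at_level_alt (arr : List Int) (level : Int) : Option (Int × Int) :=
  pvFindWall (pvRuns level arr 0 none)

-- ===== PRECONDITION & SPEC =====
def Spec_next_hole_at_level (arr : List Int) (level : Int) (out : Option (Int × Int)) : Prop := out = next_hole_at_level_alt arr level
instance (arr : List Int) (level : Int) (out : Option (Int × Int)) : Decidable (Spec_next_hole_at_level arr level out) := by unfold Spec_next_hole_at_level; infer_instance

-- ===== CLAIM (what is proved, stated in full; the proofs are below) =====
def Claim_equal_next_hole_at_level : Prop := ∀ (arr : List Int) (level : Int), Dom_next_hole_at_level arr level → Spec_next_hole_at_level arr level (next_hole_at_level arr level)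

-- ===== LEMMAS AND PROOFS =====

theorem pvScanLe_eq (arr : List Int) (level : Int) (i : Nat) :
    pvScanLe arr level i
      = i + ((arr.drop i).takeWhile (fun x => decide (x ≤ level))).length := by
  fun_induction pvScanLe arr level i with
  | case1 i h hle ih =>
    rw [List.drop_eq_getElem_cons h, List.takeWhile_cons]
    simp [hle] at *
    omega
  | case2 i h hle =>
    rw [List.drop_eq_getElem_cons h, List.takeWhile_cons]
    simp [hle]
  | case3 i h =>
    rw [List.drop_eq_nil_of_le (by omega)]
    simp

theorem pvScanGt_eq (arr : List Int) (level : Int) (i : Nat) :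
    pvScanGt arr level i
      = i + ((arr.drop i).takeWhile (fun x => decide (level < x))).length := by
  fun_induction pvScanGt arr level i with
  | case1 i h hgt ih =>
    rw [List.drop_eq_getElem_cons h, List.takeWhile_cons]
    simp [hgt] at *
    omega
  | case2 i h hgt =>
    rw [List.drop_eq_getElem_cons h, List.takeWhile_cons]
    simp [hgt]
  | case3 i h =>
    rw [List.drop_eq_nil_of_le (by omega)]
    simp

-- skipping the tail of the run whose flag was last appended
theorem pvRuns_skip (level : Int) (w : Bool) (l : List Int) (idx : Nat) :
    pvRuns level l idx (some w)
      = pvRuns level (l.dropWhile (fun x => decide (level < x) == w))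
          (idx + (l.takeWhile (fun x => decide (level < x) == w)).length) (some w) := by
  induction l generalizing idx with
  | nil => simp [pvRuns]
  | cons x xs ih =>
    by_cases hw : decide (level < x) = w
    · rw [List.dropWhile_cons_of_pos (by simp [hw]), List.takeWhile_cons_of_pos (by simp [hw])]
      simp only [pvRuns, hw, if_true, List.length_cons]
      rw [ih, show idx + ((xs.takeWhile (fun x => decide (level < x) == w)).length + 1)
            = (idx + 1) + (xs.takeWhile (fun x => decide (level < x) == w)).length from by omega]
    · rw [List.dropWhile_cons_of_neg (by simp [hw]), List.takeWhile_cons_of_neg (by simp [hw])]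
      simp

-- a new run is appended, then its tail is skipped
theorem pvRuns_emit (level x : Int) (xs : List Int) (idx : Nat) (prev : Option Bool)
    (h : prev ≠ some (decide (level < x))) :
    pvRuns level (x :: xs) idx prev
      = (decide (level < x), idx)
          :: pvRuns level ((x :: xs).dropWhile (fun y => decide (level < y) == decide (level < x)))
              (idx + ((x :: xs).takeWhile (fun y => decide (level < y) == decide (level < x))).length)
              (some (decide (level < x))) := by
  rw [List.dropWhile_cons_of_pos (by simp), List.takeWhile_cons_of_pos (by simp)]
  simp only [pvRuns, if_neg h, List.length_cons]
  rw [pvRuns_skip, show idx + ((xs.takeWhile (fun y => decide (level < y) == decide (level < x))).length + 1)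
        = (idx + 1) + (xs.takeWhile (fun y => decide (level < y) == decide (level < x))).length from by omega]

theorem pvBeqTrue (level : Int) :
    (fun y : Int => decide (level < y) == true) = (fun y : Int => decide (level < y)) := by
  funext y; simp

theorem pvBeqFalse (level : Int) :
    (fun y : Int => decide (level < y) == false) = (fun y : Int => decide (y ≤ level)) := by
  funext y; by_cases h : level < y <;> simp [h] <;> omega

theorem pvDropLenTakeWhile {α : Type} (p : α → Bool) (l : List α) :
    l.drop (l.takeWhile p).length = l.dropWhile p := by
  induction l with
  | nil => rfl
  | cons x xs ih => by_cases h : p x <;> simp [h, ih]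

theorem pvDropWhileHead {α : Type} (p : α → Bool) (l : List α) (z : α) (zs : List α)
    (h : l.dropWhile p = z :: zs) : p z = false := by
  induction l with
  | nil => simp at h
  | cons x xs ih =>
    by_cases hx : p x
    · rw [List.dropWhile_cons_of_pos hx] at h; exact ih h
    · rw [List.dropWhile_cons_of_neg hx] at h
      cases h; simpa using hx

-- from the first wall run on, B reads off exactly A's phase-2/phase-3 answer
theorem pvWallCase (level y : Int) (ys : List Int) (i1 : Nat) (hy : level < y)
    (prev : Option Bool) (hprev : prev ≠ some true) :
    pvFindWall (pvRuns level (y :: ys) i1 prev)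
      = (if ((y :: ys).dropWhile (fun x => decide (level < x))) = [] then none
         else if (((y :: ys).dropWhile (fun x => decide (level < x))).dropWhile (fun x => decide (x ≤ level))) = [] then none
         else some (((i1 + ((y :: ys).takeWhile (fun x => decide (level < x))).length : Nat) : Int),
                    ((i1 + ((y :: ys).takeWhile (fun x => decide (level < x))).length
                        + (((y :: ys).dropWhile (fun x => decide (level < x))).takeWhile (fun x => decide (x ≤ level))).length : Nat) : Int))) := by
  have hyw : decide (level < y) = true := by simp [hy]
  rw [pvRuns_emit level y ys i1 prev (by rw [hyw]; exact hprev), hyw, pvBeqTrue]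
  cases hr2 : (y :: ys).dropWhile (fun x => decide (level < x)) with
  | nil =>
    simp [pvRuns, pvFindWall]
  | cons z zs =>
    have hz : decide (level < z) = false := pvDropWhileHead (fun x => decide (level < x)) (y :: ys) z zs hr2
    rw [pvRuns_emit level z zs _ (some true) (by rw [hz]; simp), hz, pvBeqFalse]
    cases hr3 : (z :: zs).dropWhile (fun x => decide (x ≤ level)) with
    | nil =>
      simp [pvRuns, pvFindWall]
    | cons u us =>
      have hu : decide (u ≤ level) = false := pvDropWhileHead (fun x => decide (x ≤ level)) (z :: zs) u us hr3
      have hu' : decide (level < u) = true := by simp at hu ⊢; omega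
      rw [pvRuns_emit level u us _ (some false) (by rw [hu']; simp), hu']
      simp [pvFindWall]

theorem pvMain (arr : List Int) (level : Int) :
    next_hole_at_level arr level = next_hole_at_level_alt arr level := by
  unfold next_hole_at_level next_hole_at_level_alt
  have e1 : pvScanLe arr level 0 = (arr.takeWhile (fun x => decide (x ≤ level))).length := by
    simpa using pvScanLe_eq arr level 0
  have hlen1 : (arr.takeWhile (fun x => decide (x ≤ level))).length
      + (arr.dropWhile (fun x => decide (x ≤ level))).length = arr.length := by
    have h := congrArg List.length (List.takeWhile_append_dropWhile (p := fun x => decide (x ≤ level)) (l := arr))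
    rw [List.length_append] at h
    exact h
  have hdrop1 : arr.drop (arr.takeWhile (fun x => decide (x ≤ level))).length
      = arr.dropWhile (fun x => decide (x ≤ level)) := pvDropLenTakeWhile _ _
  cases hr1 : arr.dropWhile (fun x => decide (x ≤ level)) with
  | nil =>
    -- phase 1 consumes the whole array: A returns none; B's runs contain no wall
    have hi1 : pvScanLe arr level 0 = arr.length := by rw [e1]; rw [hr1] at hlen1; simp at hlen1; omega
    rw [hi1]; simp only [if_pos rfl]
    cases harr : arr with
    | nil => simp [pvRuns, pvFindWall]
    | cons x xs =>
      have hx : decide (x ≤ level) = true := by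
        by_contra hc
        rw [harr, List.dropWhile_cons_of_neg (by simpa using hc)] at hr1
        simp at hr1
      have hx' : decide (level < x) = false := by simp at hx ⊢; omega
      rw [pvRuns_emit level x xs 0 none (by simp), hx', pvBeqFalse]
      rw [← harr, hr1]
      simp [pvRuns, pvFindWall]
  | cons y ys =>
    have hi1ne : ¬ pvScanLe arr level 0 = arr.length := by
      rw [e1]; rw [hr1] at hlen1; simp at hlen1; omega
    rw [if_neg hi1ne]
    have hy : decide (y ≤ level) = false := pvDropWhileHead (fun x => decide (x ≤ level)) arr y ys hr1
    have hy' : level < y := by simpa using hy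
    -- A's remaining scans, expressed on the suffix y :: ys
    have e2 : pvScanGt arr level (pvScanLe arr level 0)
        = (arr.takeWhile (fun x => decide (x ≤ level))).length
          + ((y :: ys).takeWhile (fun x => decide (level < x))).length := by
      rw [pvScanGt_eq, e1, hdrop1, hr1]
    have hdrop2 : arr.drop ((arr.takeWhile (fun x => decide (x ≤ level))).length
          + ((y :: ys).takeWhile (fun x => decide (level < x))).length)
        = (y :: ys).dropWhile (fun x => decide (level < x)) := by
      rw [← List.drop_drop, hdrop1, hr1, pvDropLenTakeWhile]
    have hlen2 : ((y :: ys).takeWhile (fun x => decide (level < x))).length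
        + ((y :: ys).dropWhile (fun x => decide (level < x))).length = (y :: ys).length := by
      have h := congrArg List.length (List.takeWhile_append_dropWhile (p := fun x => decide (level < x)) (l := y :: ys))
      rw [List.length_append] at h
      exact h
    have hlenarr : arr.length = (arr.takeWhile (fun x => decide (x ≤ level))).length + (y :: ys).length := by
      rw [hr1] at hlen1; omega
    -- B's side: reach the first wall run, possibly after one leading non-wall run
    have hB : pvFindWall (pvRuns level arr 0 none)
        = pvFindWall (pvRuns level (y :: ys) (arr.takeWhile (fun x => decide (x ≤ level))).length
            (if arr.takeWhile (fun x => decide (x ≤ level)) = [] then none else some false)) := by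
      cases harr : arr with
      | nil => rw [harr] at hr1; simp at hr1
      | cons x xs =>
        rw [harr] at hr1
        by_cases hx : decide (x ≤ level) = true
        · have hx' : decide (level < x) = false := by simp at hx ⊢; omega
          have ht1 : ¬ (x :: xs).takeWhile (fun x => decide (x ≤ level)) = [] := by
            simp [hx]
          rw [pvRuns_emit level x xs 0 none (by simp), hx', pvBeqFalse, hr1, if_neg ht1]
          simp [pvFindWall]
        · have hxf : decide (x ≤ level) = false := by simpa using hx
          have ht1 : (x :: xs).takeWhile (fun x => decide (x ≤ level)) = [] := by
            simp [hxf]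
          have hr1' : y :: ys = x :: xs := by
            rw [← hr1, List.dropWhile_cons_of_neg (by simp [hxf])]
          rw [ht1, hr1']
          simp
    rw [hB, pvWallCase level y ys _ hy' _ (by split_ifs <;> simp)]
    cases hr2 : (y :: ys).dropWhile (fun x => decide (level < x)) with
    | nil =>
      have hA2 : pvScanGt arr level (pvScanLe arr level 0) = arr.length := by
        rw [hr2] at hlen2
        simp only [List.length_nil, Nat.add_zero] at hlen2
        rw [e2, hlenarr, hlen2]
      rw [hA2]
      simp
    | cons z zs =>
      have hlen3 : ((z :: zs).takeWhile (fun x => decide (x ≤ level))).length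
          + ((z :: zs).dropWhile (fun x => decide (x ≤ level))).length = (z :: zs).length := by
        have h := congrArg List.length (List.takeWhile_append_dropWhile (p := fun x => decide (x ≤ level)) (l := z :: zs))
        rw [List.length_append] at h
        exact h
      have hlen2' : ((y :: ys).takeWhile (fun x => decide (level < x))).length
          + (z :: zs).length = (y :: ys).length := by rw [← hr2]; exact hlen2
      have hA2 : ¬ pvScanGt arr level (pvScanLe arr level 0) = arr.length := by
        rw [e2, hlenarr]
        simp only [List.length_cons] at hlen2' ⊢
        omega
      rw [if_neg hA2, if_neg (List.cons_ne_nil z zs)]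
      have e3 : pvScanLe arr level (pvScanGt arr level (pvScanLe arr level 0))
          = (arr.takeWhile (fun x => decide (x ≤ level))).length
            + ((y :: ys).takeWhile (fun x => decide (level < x))).length
            + ((z :: zs).takeWhile (fun x => decide (x ≤ level))).length := by
        rw [pvScanLe_eq, e2, hdrop2, hr2]
      cases hr3 : (z :: zs).dropWhile (fun x => decide (x ≤ level)) with
      | nil =>
        have hA3 : pvScanLe arr level (pvScanGt arr level (pvScanLe arr level 0)) = arr.length := by
          rw [hr3] at hlen3
          simp only [List.length_nil, Nat.add_zero] at hlen3
          rw [e3, hlenarr, hlen3]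
          simp only [List.length_cons] at hlen2' ⊢
          omega
        rw [hA3]
        simp
      | cons u us =>
        have hA3 : ¬ pvScanLe arr level (pvScanGt arr level (pvScanLe arr level 0)) = arr.length := by
          rw [e3, hlenarr]
          rw [hr3] at hlen3
          simp only [List.length_cons] at hlen2' hlen3 ⊢
          omega
        rw [if_neg hA3, if_neg (List.cons_ne_nil u us), e3, e2]

-- ===== VERDICT (by name: the statement is the Claim_ definition above) =====
theorem next_hole_at_level_spec : Claim_equal_next_hole_at_level := by
  intro arr level _
  unfold Spec_next_hole_at_level
  exact pvMain arr level
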